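-- pv_equiv track=rewrite | github.com/Fmccline/AdventOfCode2021 | 3_day.py | get_common_bits
-- ===== SOURCE A (Python) =====
-- def get_common_bits(bits_list, bit_idx, is_oxygen):
--     common_bits = {'0': [], '1': []}
--     for bits in bits_list:
--         common_bits[bits[bit_idx]].append(bits)
--     if is_oxygen:
--         return common_bits['0'] if len(common_bits['1']) < len(common_bits['0']) else common_bits['1']
--     else:
--         return common_bits['1'] if len(common_bits['1']) < len(common_bits['0']) else common_bits['0']
-- ===== SOURCE B (Python) =====
-- def get_common_bits(bits_list, bit_idx, is_oxygen):
--     counts = {'0': 0, '1': 0}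
--     for bits in bits_list:
--         counts[bits[bit_idx]] += 1
--     if is_oxygen:
--         target = '1' if counts['1'] >= counts['0'] else '0'
--     else:
--         target = '0' if counts['1'] >= counts['0'] else '1'
--     return [bits for bits in bits_list if bits[bit_idx] == target]
-- ===== Notes on version B (the rewrite author's own statement) =====
-- stated objective: alternative
-- what changed: B replaces A's two partition lists with a single counting pass ({'0':n,'1':m}) that only decides the target bit character, then filters the input once to build the result; A materialises both groups and returns one of them.
import Mathlib
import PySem

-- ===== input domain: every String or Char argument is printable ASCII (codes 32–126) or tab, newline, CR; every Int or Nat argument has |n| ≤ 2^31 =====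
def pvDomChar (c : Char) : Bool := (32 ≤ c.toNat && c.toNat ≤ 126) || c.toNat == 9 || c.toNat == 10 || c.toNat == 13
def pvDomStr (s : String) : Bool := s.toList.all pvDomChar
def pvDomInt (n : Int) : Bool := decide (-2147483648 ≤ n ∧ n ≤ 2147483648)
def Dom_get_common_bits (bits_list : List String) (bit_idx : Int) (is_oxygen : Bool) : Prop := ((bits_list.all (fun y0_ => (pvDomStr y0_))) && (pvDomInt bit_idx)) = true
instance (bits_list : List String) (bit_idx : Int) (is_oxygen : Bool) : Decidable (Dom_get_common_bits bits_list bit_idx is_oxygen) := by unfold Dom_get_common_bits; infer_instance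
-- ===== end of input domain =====

-- B counts the two bit characters in one pass, picks the target character, and filters the
-- input once; A builds both partition lists and returns one — an alternative of the same cost.

-- ===== PORT A =====
-- A's dict {'0': [], '1': []} of fixed keys is rendered as a pair (value at '0', value at '1');
-- the unreachable-under-Pre_ third match arm is where Python raises (KeyError/IndexError).
def get_common_bits (bits_list : List String) (bit_idx : Int) (is_oxygen : Bool) : List String :=
  let cb := bits_list.foldl (fun (cb : List String × List String) bits =>
    match PySem.Str.pyGet? bits bit_idx with
    | some '0' => (cb.1 ++ [bits], cb.2)
    | some '1' => (cb.1, cb.2 ++ [bits])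
    | _ => cb) ([], [])
  if is_oxygen then
    if cb.2.length < cb.1.length then cb.1 else cb.2
  else
    if cb.2.length < cb.1.length then cb.2 else cb.1

-- ===== PORT B =====
-- counts = {'0': a, '1': b} rendered as the pair (a, b); the third arm is Python's raise.
def get_common_bits_alt (bits_list : List String) (bit_idx : Int) (is_oxygen : Bool) : List String :=
  let counts := bits_list.foldl (fun (c : Int × Int) bits =>
    if PySem.Str.pyGet? bits bit_idx = some '0' then (c.1 + 1, c.2)
    else if PySem.Str.pyGet? bits bit_idx = some '1' then (c.1, c.2 + 1)
    else c) (0, 0)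
  let target : Char :=
    if is_oxygen then (if counts.2 ≥ counts.1 then '1' else '0')
    else (if counts.2 ≥ counts.1 then '0' else '1')
  bits_list.filter (fun bits => PySem.Str.pyGet? bits bit_idx == some target)

-- ===== PRECONDITION & SPEC =====
-- Exactly the inputs where A returns: every string has a character at bit_idx and it is '0' or '1';
-- otherwise both A and B raise (IndexError/KeyError).
def Pre_get_common_bits (bits_list : List String) (bit_idx : Int) (is_oxygen : Bool) : Prop :=
  ∀ s ∈ bits_list, PySem.Str.pyGet? s bit_idx = some '0' ∨ PySem.Str.pyGet? s bit_idx = some '1'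
instance (bits_list : List String) (bit_idx : Int) (is_oxygen : Bool) : Decidable (Pre_get_common_bits bits_list bit_idx is_oxygen) := by unfold Pre_get_common_bits; infer_instance

def pvWitness_get_common_bits : List String × Int × Bool := (["10", "01", "11"], 0, true)

def Spec_get_common_bits (bits_list : List String) (bit_idx : Int) (is_oxygen : Bool) (out : List String) : Prop := out = get_common_bits_alt bits_list bit_idx is_oxygen
instance (bits_list : List String) (bit_idx : Int) (is_oxygen : Bool) (out : List String) : Decidable (Spec_get_common_bits bits_list bit_idx is_oxygen out) := by unfold Spec_get_common_bits; infer_instance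

-- ===== CLAIM (what is proved, stated in full; the proofs are below) =====
def Claim_equal_get_common_bits : Prop := ∀ (bits_list : List String) (bit_idx : Int) (is_oxygen : Bool), Dom_get_common_bits bits_list bit_idx is_oxygen → Pre_get_common_bits bits_list bit_idx is_oxygen → Spec_get_common_bits bits_list bit_idx is_oxygen (get_common_bits bits_list bit_idx is_oxygen)

-- ===== LEMMAS AND PROOFS =====

-- A's fold builds, appended to the accumulator, the two order-preserving filters
-- (g abstracts the indexing 'fun s => PySem.Str.pyGet? s bit_idx').
theorem pvA_fold (g : String → Option Char) (l : List String) (z o : List String)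
    (h : ∀ s ∈ l, g s = some '0' ∨ g s = some '1') :
    l.foldl (fun (cb : List String × List String) bits =>
      match g bits with
      | some '0' => (cb.1 ++ [bits], cb.2)
      | some '1' => (cb.1, cb.2 ++ [bits])
      | _ => cb) (z, o)
    = (z ++ l.filter (fun s => g s == some '0'),
       o ++ l.filter (fun s => g s == some '1')) := by
  induction l generalizing z o with
  | nil => simp
  | cons s t ih =>
    rcases h s (by simp) with h0 | h0 <;>
      simp [List.foldl_cons, h0,
        ih _ _ (fun x hx => h x (by simp [hx]))]

-- B's counting fold computes the (Int-valued) lengths of those filters, plus the accumulator.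
theorem pvB_fold (g : String → Option Char) (l : List String) (a b : Int)
    (h : ∀ s ∈ l, g s = some '0' ∨ g s = some '1') :
    l.foldl (fun (c : Int × Int) bits =>
      if g bits = some '0' then (c.1 + 1, c.2)
      else if g bits = some '1' then (c.1, c.2 + 1)
      else c) (a, b)
    = (a + (l.filter (fun s => g s == some '0')).length,
       b + (l.filter (fun s => g s == some '1')).length) := by
  induction l generalizing a b with
  | nil => simp
  | cons s t ih =>
    rcases h s (by simp) with h0 | h0 <;>
      simp [List.foldl_cons, h0,
        ih _ _ (fun x hx => h x (by simp [hx]))] <;> ring_nf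

-- ===== VERDICT (by name: the statement is the Claim_ definition above) =====
theorem get_common_bits_spec : Claim_equal_get_common_bits := by
  intro bits_list bit_idx is_oxygen _ hpre
  unfold Spec_get_common_bits get_common_bits get_common_bits_alt
  rw [pvA_fold (fun s => PySem.Str.pyGet? s bit_idx) bits_list [] [] hpre,
      pvB_fold (fun s => PySem.Str.pyGet? s bit_idx) bits_list 0 0 hpre]
  simp only [PySem.Str.pyGet?, List.nil_append, Int.zero_add, ge_iff_le, Nat.cast_le]
  by_cases hle :
      (bits_list.filter (fun s => PySem.List.pyGet? s.toList bit_idx == some '0')).length ≤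
      (bits_list.filter (fun s => PySem.List.pyGet? s.toList bit_idx == some '1')).length
  · cases is_oxygen <;> simp [hle, Nat.not_lt.mpr hle]
  · have hlt := Nat.lt_of_not_le hle
    cases is_oxygen <;> simp [hle, hlt]
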